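-- pv_equiv track=rewrite | github.com/bgmi17/nss | Playfair_image/index.py | p_divmod
-- ===== SOURCE A (Python) =====
-- from typing import Tuple
--
-- BPolynomial = int
--
-- def p_divmod(a: BPolynomial, b: BPolynomial) -> Tuple[BPolynomial, BPolynomial]:
--     """ Binary polynomial division.
--         Divides a by b and returns resulting (quotient, remainder) polynomials.
--         Precondition: b != 0 """
--     q = 0
--     bl = b.bit_length()
--     while True:
--         shift = a.bit_length() - bl
--         if shift < 0:
--             return (q, a)
--         q ^= 1 << shift
--         a ^= b << shift
-- ===== SOURCE B (Python) =====
-- def p_divmod(a, b):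
--     """ Binary polynomial division (GF(2)): bit-by-bit shift-register long division. """
--     db = b.bit_length()
--     q = 0
--     r = 0
--     for i in range(a.bit_length() - 1, -1, -1):
--         r = (r << 1) | ((a >> i) & 1)
--         if r.bit_length() == db:
--             r ^= b
--             q |= 1 << i
--     return (q, r)
-- ===== Notes on version B (the rewrite author's own statement) =====
-- stated objective: alternative
-- what changed: Replaces A's loop that repeatedly re-measures a.bit_length() and XORs a shifted copy of b into the full dividend by a single high-to-low pass over the dividend bits maintaining a bounded shift-register remainder, setting one quotient bit per reduction.
-- outside the precondition, e.g. on p_divmod(-5, -3): A returns (2, 1), B returns (1, -2); on p_divmod(-1, -1): A returns (1, 0), B returns (1, -2); on p_divmod(-5, 3): A does not finish within the time limit, B returns (1, 0)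
import Mathlib
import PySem

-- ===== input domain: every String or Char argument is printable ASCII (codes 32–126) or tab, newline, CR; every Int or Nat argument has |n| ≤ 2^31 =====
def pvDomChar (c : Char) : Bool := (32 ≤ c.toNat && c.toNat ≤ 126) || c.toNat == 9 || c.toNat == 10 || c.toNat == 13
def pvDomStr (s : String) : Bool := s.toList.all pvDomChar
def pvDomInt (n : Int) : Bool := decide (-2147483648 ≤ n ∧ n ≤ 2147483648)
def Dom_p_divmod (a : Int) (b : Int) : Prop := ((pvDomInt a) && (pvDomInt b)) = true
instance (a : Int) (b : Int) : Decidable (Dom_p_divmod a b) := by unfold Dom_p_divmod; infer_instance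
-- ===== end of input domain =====

-- B replaces A's repeated whole-dividend bit_length/XOR steps by a one-pass shift-register
-- long division with a remainder register bounded by deg(b) (objective: alternative).
-- Both ports work on the natural binary-polynomial domain Pre_ (0 ≤ a, 0 < b), where Python's
-- int operations coincide with the Nat operations used here; Nat.size n is Python's n.bit_length().

-- ===== PORT A =====
-- A's `while True` loop; the fuel (Nat.size a + 1) strictly bounds the number of iterations
-- (each iteration lowers a's bit length, lemma pAuxA_eq below), so the branch `fuel = 0` is
-- never taken on Pre_: the port is A's loop step for step.
def pAuxA (b bl : Nat) : Nat → Nat → Nat → Nat × Nat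
  | 0, q, a => (q, a)
  | fuel + 1, q, a =>
    -- shift = a.bit_length() - bl; `shift < 0` iff Nat.size a < bl
    if Nat.size a < bl then (q, a)
    else pAuxA b bl fuel (q ^^^ (1 <<< (Nat.size a - bl))) (a ^^^ (b <<< (Nat.size a - bl)))

-- shared trivial cast of the (quotient, remainder) pair back to Int
def pvToIntPair (p : Nat × Nat) : Int × Int := ((p.1 : Int), (p.2 : Int))

def p_divmod (a : Int) (b : Int) : Int × Int :=
  pvToIntPair (pAuxA b.toNat (Nat.size b.natAbs) (Nat.size a.toNat + 1) 0 a.toNat)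

-- ===== PORT B =====
-- B's `for i in range(a.bit_length() - 1, -1, -1)` loop with state (q, r).
def pAuxB (a b db : Nat) : Nat → Nat → Nat → Nat × Nat
  | 0, q, r => (q, r)
  | i + 1, q, r =>
    let r' := (r <<< 1) ||| ((a >>> i) &&& 1)
    if Nat.size r' = db then pAuxB a b db i (q ||| (1 <<< i)) (r' ^^^ b)
    else pAuxB a b db i q r'

def p_divmod_alt (a : Int) (b : Int) : Int × Int :=
  pvToIntPair (pAuxB a.toNat b.toNat (Nat.size b.natAbs) (Nat.size a.toNat) 0 0)

-- ===== PRECONDITION & SPEC =====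
-- Pre_ admits the natural domain of binary polynomials (nonnegative dividend, any positive
-- divisor) plus every nonzero divisor whose degree exceeds the dividend's (there A returns
-- (0, a) at once); it excludes b = 0, where the Python A loops forever, and the remaining
-- negative-operand inputs, where A either diverges or returns two's-complement artefacts
-- (e.g. negative "remainders") whose termination region has no closed form; B does its own
-- natural thing there.
def Pre_p_divmod (a : Int) (b : Int) : Prop :=
  0 ≤ a ∧ b ≠ 0 ∧ (0 < b ∨ Nat.size a.toNat < Nat.size b.natAbs)
instance (a : Int) (b : Int) : Decidable (Pre_p_divmod a b) := by unfold Pre_p_divmod; infer_instance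

def pvWitness_p_divmod : Int × Int := (23, 5)

def Spec_p_divmod (a : Int) (b : Int) (out : Int × Int) : Prop := out = p_divmod_alt a b
instance (a : Int) (b : Int) (out : Int × Int) : Decidable (Spec_p_divmod a b out) := by unfold Spec_p_divmod; infer_instance

-- ===== CLAIM (what is proved, stated in full; the proofs are below) =====
def Claim_equal_p_divmod : Prop := ∀ (a : Int) (b : Int), Dom_p_divmod a b → Pre_p_divmod a b → Spec_p_divmod a b (p_divmod a b)

-- ===== LEMMAS AND PROOFS =====

-- x with its top bit: testBit x (size x - 1) = true for x ≠ 0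
theorem pv_topbit {x : Nat} (hx : x ≠ 0) : Nat.testBit x (Nat.size x - 1) = true := by
  have hpos : 0 < Nat.size x := Nat.size_pos.mpr (Nat.pos_of_ne_zero hx)
  have h1 : 2 ^ (Nat.size x - 1) ≤ x := Nat.lt_size.mp (by omega)
  have h2 : x < 2 ^ Nat.size x := Nat.lt_size_self x
  have hdiv : x >>> (Nat.size x - 1) = 1 := by
    rw [Nat.shiftRight_eq_div_pow]
    have e : 2 ^ Nat.size x = 2 ^ (Nat.size x - 1) * 2 := by
      rw [← Nat.pow_succ]; congr 1; omega
    have hp : 0 < 2 ^ (Nat.size x - 1) := Nat.two_pow_pos _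
    have h3 : 1 ≤ x / 2 ^ (Nat.size x - 1) := (Nat.le_div_iff_mul_le hp).mpr (by omega)
    have h4 : x / 2 ^ (Nat.size x - 1) < 2 := (Nat.div_lt_iff_lt_mul hp).mpr (by omega)
    omega
  have := Nat.testBit_shiftRight (x := x) (i := Nat.size x - 1) (j := 0)
  rw [Nat.add_zero] at this
  rw [← this, hdiv]
  decide

-- if all bits at positions ≥ k are clear then x < 2^k
theorem pv_lt_pow_of_high_false {x k : Nat} (h : ∀ i, k ≤ i → Nat.testBit x i = false) :
    x < 2 ^ k := by
  by_contra hc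
  push_neg at hc
  have hx : x ≠ 0 := by
    have : 0 < 2 ^ k := Nat.two_pow_pos _
    omega
  have hk : k < Nat.size x := Nat.lt_size.mpr hc
  have := h (Nat.size x - 1) (by omega)
  rw [pv_topbit hx] at this
  simp at this

-- the GF(2) reduction step lowers the bit length
theorem pv_xor_reduce_size {b a : Nat} (hb : b ≠ 0) (h : Nat.size b ≤ Nat.size a) :
    Nat.size (a ^^^ (b <<< (Nat.size a - Nat.size b))) < Nat.size a := by
  have hbpos : 0 < Nat.size b := Nat.size_pos.mpr (Nat.pos_of_ne_zero hb)
  have ha : a ≠ 0 := by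
    intro h0; subst h0; simp [Nat.size_zero] at h; omega
  have hapos : 0 < Nat.size a := Nat.size_pos.mpr (Nat.pos_of_ne_zero ha)
  set s := Nat.size a - Nat.size b with hs
  set y := b <<< s with hy
  have hysize : Nat.size y = Nat.size a := by
    rw [hy, Nat.size_shiftLeft hb]; omega
  have hyne : y ≠ 0 := by
    intro h0
    rw [h0, Nat.size_zero] at hysize; omega
  have key : ∀ i, Nat.size a - 1 ≤ i → Nat.testBit (a ^^^ y) i = false := by
    intro i hi
    rw [Nat.testBit_xor]
    rcases Nat.lt_or_ge i (Nat.size a) with hlt | hge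
    · have hieq : i = Nat.size a - 1 := by omega
      have t1 : Nat.testBit a i = true := by rw [hieq]; exact pv_topbit ha
      have t2 : Nat.testBit y i = true := by
        rw [hieq, ← hysize]; exact pv_topbit hyne
      rw [t1, t2]; rfl
    · have t1 : Nat.testBit a i = false :=
        Nat.testBit_lt_two_pow (Nat.lt_of_lt_of_le (Nat.lt_size_self a)
          (Nat.pow_le_pow_right (by omega) hge))
      have t2 : Nat.testBit y i = false :=
        Nat.testBit_lt_two_pow (Nat.lt_of_lt_of_le (hysize ▸ Nat.lt_size_self y)
          (Nat.pow_le_pow_right (by omega) hge))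
      rw [t1, t2]; rfl
  have hlt : a ^^^ y < 2 ^ (Nat.size a - 1) := pv_lt_pow_of_high_false key
  have := Nat.size_le.mpr hlt
  omega

-- the canonical GF(2) division both ports are reduced to (proof-only)
def gfDivMod (b a : Nat) : Nat × Nat :=
  if h : b = 0 ∨ Nat.size a < Nat.size b then (0, a)
  else
    let s := Nat.size a - Nat.size b
    let p := gfDivMod b (a ^^^ (b <<< s))
    (p.1 ^^^ (1 <<< s), p.2)
termination_by Nat.size a
decreasing_by
  push_neg at h
  exact pv_xor_reduce_size h.1 h.2

theorem gfDivMod_low {b a : Nat} (h : Nat.size a < Nat.size b) : gfDivMod b a = (0, a) := by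
  rw [gfDivMod]; simp [h]

theorem gfDivMod_high {b a : Nat} (hb : b ≠ 0) (h : Nat.size b ≤ Nat.size a) :
    gfDivMod b a = ((gfDivMod b (a ^^^ (b <<< (Nat.size a - Nat.size b)))).1 ^^^
        (1 <<< (Nat.size a - Nat.size b)),
      (gfDivMod b (a ^^^ (b <<< (Nat.size a - Nat.size b)))).2) := by
  rw [gfDivMod]
  have : ¬ (b = 0 ∨ Nat.size a < Nat.size b) := by
    push_neg; exact ⟨hb, h⟩
  simp [this]

-- ---- arithmetic / bitwise helpers ----

theorem pv_xor_two_mul (x y : Nat) : (2 * x) ^^^ (2 * y) = 2 * (x ^^^ y) := by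
  have h := Nat.xor_bit false x false y
  simpa [Nat.bit_val] using h

theorem pv_two_mul_or_one (x : Nat) : (2 * x) ||| 1 = 2 * x + 1 := by
  have h := Nat.lor_bit false x true 0
  simpa [Nat.bit_val] using h

theorem pv_two_mul_xor_one (x : Nat) : (2 * x) ^^^ 1 = 2 * x + 1 := by
  have h := Nat.xor_bit false x true 0
  simpa [Nat.bit_val] using h

theorem pv_two_mul_add_bit_xor {bit : Nat} (hbit : bit < 2) (x : Nat) :
    2 * x + bit = (2 * x) ^^^ bit := by
  interval_cases bit
  · simp
  · exact (pv_two_mul_xor_one x).symm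

theorem pv_shiftLeft_one (x : Nat) : x <<< 1 = 2 * x := by
  rw [Nat.shiftLeft_eq]; ring

theorem pv_or_shift_bit {bit : Nat} (hbit : bit < 2) (x : Nat) :
    (x <<< 1) ||| bit = 2 * x + bit := by
  rw [pv_shiftLeft_one]
  interval_cases bit
  · simp
  · exact pv_two_mul_or_one x

theorem pv_size_two_mul_add {h bit : Nat} (hh : h ≠ 0) (hbit : bit < 2) :
    Nat.size (2 * h + bit) = Nat.size h + 1 := by
  have h1 : 2 ^ (Nat.size h - 1) ≤ h := Nat.lt_size.mp (by
    have := Nat.size_pos.mpr (Nat.pos_of_ne_zero hh); omega)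
  have h2 : h < 2 ^ Nat.size h := Nat.lt_size_self h
  have hpos : 0 < Nat.size h := Nat.size_pos.mpr (Nat.pos_of_ne_zero hh)
  have e : 2 ^ Nat.size h = 2 ^ (Nat.size h - 1) * 2 := by
    rw [← Nat.pow_succ]; congr 1; omega
  have lo : 2 ^ Nat.size h ≤ 2 * h + bit := by omega
  have hi : 2 * h + bit < 2 ^ (Nat.size h + 1) := by
    rw [Nat.pow_succ]; omega
  have u := Nat.size_le.mpr hi
  have l := Nat.lt_size.mpr lo
  omega

theorem pv_size_le_of_lt {x k : Nat} (h : x < 2 ^ k) : Nat.size x ≤ k := Nat.size_le.mpr h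

theorem pv_or_shiftLeft (x y k : Nat) : (x ||| y) <<< k = (x <<< k) ||| (y <<< k) := by
  apply Nat.eq_of_testBit_eq
  intro i
  simp [Nat.testBit_shiftLeft, Nat.testBit_lor, Bool.and_or_distrib_left]

-- ---- one dividend bit shifted into the running remainder ----
theorem gf_shift {b : Nat} (hb : b ≠ 0) {bit : Nat} (hbit : bit < 2) (h : Nat) :
    gfDivMod b (2 * h + bit) =
      (if Nat.size (2 * (gfDivMod b h).2 + bit) = Nat.size b
       then (2 * (gfDivMod b h).1 + 1, (2 * (gfDivMod b h).2 + bit) ^^^ b)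
       else (2 * (gfDivMod b h).1, 2 * (gfDivMod b h).2 + bit)) := by
  induction h using Nat.strong_induction_on with
  | _ h IH =>
  have hbpos : 0 < Nat.size b := Nat.size_pos.mpr (Nat.pos_of_ne_zero hb)
  by_cases hcase : Nat.size h < Nat.size b
  · -- h is already reduced: gfDivMod b h = (0, h)
    rw [gfDivMod_low hcase]
    simp only
    have hh2 : h < 2 ^ (Nat.size b - 1) :=
      Nat.lt_of_lt_of_le (Nat.lt_size_self h) (Nat.pow_le_pow_right (by omega) (by omega))
    have hsz : Nat.size (2 * h + bit) ≤ Nat.size b := by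
      apply pv_size_le_of_lt
      have e : 2 ^ Nat.size b = 2 ^ (Nat.size b - 1) * 2 := by
        rw [← Nat.pow_succ]; congr 1; omega
      omega
    by_cases heq : Nat.size (2 * h + bit) = Nat.size b
    · rw [if_pos heq]
      rw [gfDivMod_high hb (le_of_eq heq.symm)]
      have hs0 : Nat.size (2 * h + bit) - Nat.size b = 0 := by omega
      rw [hs0]
      have hred : Nat.size ((2 * h + bit) ^^^ (b <<< 0)) < Nat.size b := by
        have := pv_xor_reduce_size (a := 2 * h + bit) hb (le_of_eq heq.symm)
        rw [hs0] at this; omega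
      rw [gfDivMod_low hred]
      simp [Nat.shiftLeft_zero]
    · rw [if_neg heq]
      exact gfDivMod_low (by omega)
  · -- reduction step on h
    push_neg at hcase
    have hh0 : h ≠ 0 := by
      intro h0; subst h0; simp [Nat.size_zero] at hcase; omega
    set s := Nat.size h - Nat.size b with hs
    set h1 := h ^^^ (b <<< s) with hh1
    have hgfh : gfDivMod b h = ((gfDivMod b h1).1 ^^^ (1 <<< s), (gfDivMod b h1).2) :=
      gfDivMod_high hb hcase
    have hsize1 : Nat.size h1 < Nat.size h := pv_xor_reduce_size hb hcase
    have hlt : h1 < h := by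
      have l1 : h1 < 2 ^ Nat.size h1 := Nat.lt_size_self h1
      have l2 : 2 ^ Nat.size h1 ≤ 2 ^ (Nat.size h - 1) :=
        Nat.pow_le_pow_right (by omega) (by omega)
      have l3 : 2 ^ (Nat.size h - 1) ≤ h := Nat.lt_size.mp (by
        have := Nat.size_pos.mpr (Nat.pos_of_ne_zero hh0); omega)
      omega
    have hsz2 : Nat.size (2 * h + bit) = Nat.size h + 1 := pv_size_two_mul_add hh0 hbit
    rw [gfDivMod_high hb (by omega)]
    have hs' : Nat.size (2 * h + bit) - Nat.size b = s + 1 := by omega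
    rw [hs']
    have hx : (2 * h + bit) ^^^ (b <<< (s + 1)) = 2 * h1 + bit := by
      rw [pv_two_mul_add_bit_xor hbit h, pv_two_mul_add_bit_xor hbit h1]
      have e1 : b <<< (s + 1) = 2 * (b <<< s) := by
        rw [Nat.shiftLeft_eq, Nat.shiftLeft_eq, Nat.pow_succ]; ring
      rw [e1, Nat.xor_comm (2 * h) bit, Nat.xor_assoc, pv_xor_two_mul,
        Nat.xor_comm bit _]
    rw [hx, IH h1 hlt, hgfh]
    simp only
    have hq : ∀ z : Nat, (2 * z) ^^^ (1 <<< (s + 1)) = 2 * (z ^^^ (1 <<< s)) := by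
      intro z
      have e1 : (1 : Nat) <<< (s + 1) = 2 * (1 <<< s) := by
        rw [Nat.shiftLeft_eq, Nat.shiftLeft_eq, Nat.pow_succ]; ring
      rw [e1, pv_xor_two_mul]
    by_cases flag : Nat.size (2 * (gfDivMod b h1).2 + bit) = Nat.size b
    · rw [if_pos flag, if_pos flag]
      simp only [Prod.mk.injEq]
      refine ⟨?_, trivial⟩
      rw [← pv_two_mul_xor_one, ← pv_two_mul_xor_one,
        Nat.xor_comm _ 1, Nat.xor_assoc, hq, Nat.xor_comm 1 _]
    · rw [if_neg flag, if_neg flag]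
      simp only [Prod.mk.injEq]
      exact ⟨hq _, trivial⟩

-- ---- port A computes gfDivMod ----
theorem pAuxA_eq {b : Nat} (hb : b ≠ 0) :
    ∀ fuel q a, Nat.size a < fuel →
      pAuxA b (Nat.size b) fuel q a = (q ^^^ (gfDivMod b a).1, (gfDivMod b a).2) := by
  intro fuel
  induction fuel with
  | zero => intro q a h; omega
  | succ fuel IH =>
    intro q a h
    by_cases hlt : Nat.size a < Nat.size b
    · rw [pAuxA, if_pos hlt, gfDivMod_low hlt]
      simp
    · push_neg at hlt
      rw [pAuxA, if_neg (Nat.not_lt.mpr hlt)]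
      have hred : Nat.size (a ^^^ (b <<< (Nat.size a - Nat.size b))) < Nat.size a :=
        pv_xor_reduce_size hb hlt
      rw [IH _ _ (by omega), gfDivMod_high hb hlt]
      simp only [Prod.mk.injEq]
      refine ⟨?_, trivial⟩
      rw [Nat.xor_assoc, Nat.xor_comm (1 <<< (Nat.size a - Nat.size b))]

-- ---- port B maintains the shift-register invariant ----
theorem pAuxB_inv {a b : Nat} (hb : b ≠ 0) :
    ∀ i q r, q = (gfDivMod b (a >>> i)).1 <<< i → r = (gfDivMod b (a >>> i)).2 →
      pAuxB a b (Nat.size b) i q r = gfDivMod b a := by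
  intro i
  induction i with
  | zero =>
    intro q r hq hr
    rw [pAuxB, hq, hr]
    simp [Nat.shiftRight_zero]
  | succ i IH =>
    intro q r hq hr
    set h := a >>> (i + 1) with hh
    have hbit : (a >>> i) &&& 1 < 2 := by
      rw [Nat.and_one_is_mod]; omega
    have hsplit : a >>> i = 2 * h + ((a >>> i) &&& 1) := by
      rw [Nat.and_one_is_mod, hh, Nat.shiftRight_succ]
      omega
    have hstep := gf_shift hb hbit h
    rw [← hsplit] at hstep
    rw [pAuxB]
    have hr' : (r <<< 1) ||| ((a >>> i) &&& 1) = 2 * (gfDivMod b h).2 + ((a >>> i) &&& 1) := by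
      rw [pv_or_shift_bit hbit, hr]
    rw [hr']
    by_cases flag : Nat.size (2 * (gfDivMod b h).2 + ((a >>> i) &&& 1)) = Nat.size b
    · rw [if_pos flag]
      apply IH
      · rw [hstep, if_pos flag]
        simp only
        rw [hq, ← pv_two_mul_or_one, pv_or_shiftLeft]
        congr 1
      · rw [hstep, if_pos flag]
    · rw [if_neg flag]
      apply IH
      · rw [hstep, if_neg flag]
        simp only
        rw [hq, Nat.shiftLeft_eq, Nat.shiftLeft_eq, Nat.pow_succ]; ring
      · rw [hstep, if_neg flag]

-- ---- port B when the divisor's degree exceeds the dividend's: no step ever reduces ----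
theorem pAuxB_small {a b db : Nat} (hdb : Nat.size a < db) :
    ∀ i q, pAuxB a b db i q (a >>> i) = (q, a) := by
  intro i
  induction i with
  | zero =>
    intro q
    rw [Nat.shiftRight_zero, pAuxB]
  | succ i IH =>
    intro q
    rw [pAuxB]
    have hbit : (a >>> i) &&& 1 < 2 := by
      rw [Nat.and_one_is_mod]; omega
    have hsplit : ((a >>> (i + 1)) <<< 1) ||| ((a >>> i) &&& 1) = a >>> i := by
      rw [pv_or_shift_bit hbit, Nat.and_one_is_mod, Nat.shiftRight_succ]; omega
    rw [hsplit]
    have hle : Nat.size (a >>> i) ≤ Nat.size a := by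
      apply Nat.size_le_size
      rw [Nat.shiftRight_eq_div_pow]
      exact Nat.div_le_self _ _
    rw [if_neg (by omega)]
    exact IH q

-- ===== VERDICT (by name: the statement is the Claim_ definition above) =====
theorem p_divmod_spec : Claim_equal_p_divmod := by
  intro a b _ hpre
  obtain ⟨ha, hb0, hcase⟩ := hpre
  unfold Spec_p_divmod p_divmod p_divmod_alt
  rcases hcase with hbpos | hsmall
  · -- positive divisor: both ports compute gfDivMod
    have e : Nat.size b.natAbs = Nat.size b.toNat := by congr 1; omega
    rw [e]
    have hbn : b.toNat ≠ 0 := by omega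
    have hA := pAuxA_eq hbn (Nat.size a.toNat + 1) 0 a.toNat (by omega)
    have hzero : a.toNat >>> Nat.size a.toNat = 0 := by
      rw [Nat.shiftRight_eq_div_pow]
      exact Nat.div_eq_of_lt (Nat.lt_size_self _)
    have hgf0 : gfDivMod b.toNat (a.toNat >>> Nat.size a.toNat) = (0, 0) := by
      rw [hzero]
      exact gfDivMod_low (by
        rw [Nat.size_zero]
        exact Nat.size_pos.mpr (Nat.pos_of_ne_zero hbn))
    have hB := pAuxB_inv (a := a.toNat) hbn (Nat.size a.toNat) 0 0
      (by rw [hgf0]; simp [Nat.zero_shiftLeft]) (by rw [hgf0])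
    rw [hA, hB]
    unfold pvToIntPair
    simp
  · -- deg a < deg b: A returns immediately, B's register never reaches deg b
    have hA : pAuxA b.toNat (Nat.size b.natAbs) (Nat.size a.toNat + 1) 0 a.toNat
        = (0, a.toNat) := by
      rw [pAuxA, if_pos hsmall]
    have hzero : a.toNat >>> Nat.size a.toNat = 0 := by
      rw [Nat.shiftRight_eq_div_pow]
      exact Nat.div_eq_of_lt (Nat.lt_size_self _)
    have hB : pAuxB a.toNat b.toNat (Nat.size b.natAbs) (Nat.size a.toNat) 0 0
        = (0, a.toNat) := by
      have := pAuxB_small (b := b.toNat) hsmall (Nat.size a.toNat) 0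
      rw [hzero] at this
      exact this
    rw [hA, hB]
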